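-- pv_equiv track=rewrite | github.com/onikss793/algo | py/kakao/report.py | solution
-- ===== SOURCE A (Python) =====
-- from typing import List
--
-- def solution(id_list, report: List[str], k):
--     answer = []
--     id_set = set(report)
--
--     reported_id_map = {}
--     reporter_id_map = {}
--
--     for r in id_set:
--         user, target = r.split(" ")
--
--         if target not in reported_id_map:
--             reported_id_map[target] = 1
--         else:
--             reported_id_map[target] += 1
--
--     for r in id_set:
--         user, target = r.split(" ")
--         count = reported_id_map.get(target)
--
--         reporter_id_map.setdefault(user, 0)
--
--         if count // k > 0:
--             reporter_id_map[user] += 1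
--
--     for id in id_list:
--         result = reporter_id_map.get(id) if reporter_id_map.get(id) else 0
--         answer.append(result)
--
--     return answer
-- ===== SOURCE B (Python) =====
-- def solution(id_list, report, k):
--     pairs = [r.split(" ") for r in set(report)]
--     times_reported = {}
--     for _, target in pairs:
--         times_reported[target] = times_reported.get(target, 0) + 1
--     return [sum(1 for user, target in pairs
--                 if user == id and 0 < k <= times_reported[target])
--             for id in id_list]
-- ===== Notes on version B (the rewrite author's own statement) =====
-- stated objective: simpler
-- what changed: B splits each distinct report once into a pair list, keeps only the per-target report-count dict, and answers each id by a direct count over the pairs with the chained test 0 < k <= count, eliminating A's reporter_id_map dict, its setdefault/increment pass and the floor-division test.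
import Mathlib
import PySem

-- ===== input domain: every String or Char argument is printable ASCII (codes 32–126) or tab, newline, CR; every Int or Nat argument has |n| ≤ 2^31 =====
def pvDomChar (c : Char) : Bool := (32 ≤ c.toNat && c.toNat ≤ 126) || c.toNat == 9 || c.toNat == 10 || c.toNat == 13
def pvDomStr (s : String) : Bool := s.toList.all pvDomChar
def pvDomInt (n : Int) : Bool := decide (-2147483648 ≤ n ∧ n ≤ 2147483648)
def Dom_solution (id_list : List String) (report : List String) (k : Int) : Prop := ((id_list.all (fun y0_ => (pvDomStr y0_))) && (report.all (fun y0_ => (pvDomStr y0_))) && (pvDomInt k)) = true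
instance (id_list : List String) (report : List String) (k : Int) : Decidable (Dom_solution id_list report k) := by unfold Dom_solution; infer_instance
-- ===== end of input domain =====

-- B splits each distinct report once into a pair list, counts reports per target with one dict,
-- and produces each id's answer by a direct count over the pairs — the reporter dict of A disappears.

-- `user, target = r.split(" ")`: both Pythons do this unpack; on a string that does not split
-- into exactly two pieces Python raises ValueError (excluded by Pre_); the ("", "") branch is unreachable there.
def pvSplit2 (r : String) : String × String :=
  match PySem.Str.split? r " " with
  | some [u, t] => (u, t)
  | _ => ("", "")

-- ===== PORT A =====
def solution (id_list : List String) (report : List String) (k : Int) : List Int :=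
  let id_set : PySem.Set String := PySem.Set.ofList report
  let reported : PySem.Dict String Int :=
    id_set.foldl (fun d r =>
      let ut := pvSplit2 r
      if ¬ d.contains ut.2 then d.insert ut.2 1
      else d.insert ut.2 (d.getD ut.2 0 + 1)) PySem.Dict.empty
  let reporter : PySem.Dict String Int :=
    id_set.foldl (fun d r =>
      let ut := pvSplit2 r
      let count := (reported.get? ut.2).getD 0   -- Python's .get(target): always `some` here, target was inserted above
      let d' := PySem.Dict.setdefault d ut.1 0
      if PySem.Int.floordiv count k > 0 then d'.insert ut.1 (d'.getD ut.1 0 + 1) else d') PySem.Dict.empty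
  id_list.map (fun id =>
    match reporter.get? id with   -- `x if x else 0`: None and 0 are falsy
    | some v => if v ≠ 0 then v else 0
    | none => 0)

-- ===== PORT B =====
def solution_alt (id_list : List String) (report : List String) (k : Int) : List Int :=
  let pairs : List (String × String) := (PySem.Set.ofList report).map pvSplit2
  let times : PySem.Dict String Int :=
    pairs.foldl (fun d p => d.insert p.2 (d.getD p.2 0 + 1)) PySem.Dict.empty
  id_list.map (fun id =>
    pairs.foldl (fun (acc : Int) (p : String × String) =>
      if p.1 = id ∧ 0 < k ∧ k ≤ times.getD p.2 0 then acc + 1 else acc) (0 : Int))  -- `0 < k <= times[p.2]`; key always present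

-- ===== PRECONDITION & SPEC =====
-- Pre_ is exactly A's return domain: it excludes k = 0 when any report exists (ZeroDivisionError at
-- `count // k`) and report entries that do not split into exactly two space-separated tokens (ValueError).
def Pre_solution (id_list : List String) (report : List String) (k : Int) : Prop :=
  (k ≠ 0 ∨ report = []) ∧ ∀ r ∈ report, ((PySem.Str.split? r " ").getD []).length = 2
instance (id_list : List String) (report : List String) (k : Int) : Decidable (Pre_solution id_list report k) := by unfold Pre_solution; infer_instance

def pvWitness_solution : List String × List String × Int := (["a", "b"], ["a b", "c b"], 1)

def Spec_solution (id_list : List String) (report : List String) (k : Int) (out : List Int) : Prop := out = solution_alt id_list report k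
instance (id_list : List String) (report : List String) (k : Int) (out : List Int) : Decidable (Spec_solution id_list report k out) := by unfold Spec_solution; infer_instance

-- ===== CLAIM (what is proved, stated in full; the proofs are below) =====
def Claim_equal_solution : Prop := ∀ (id_list : List String) (report : List String) (k : Int), Dom_solution id_list report k → Pre_solution id_list report k → Spec_solution id_list report k (solution id_list report k)
-- ===== LEMMAS AND PROOFS =====

theorem pv_getD_eq (d : PySem.Dict String Int) (x : String) :
    d.getD x 0 = (d.get? x).getD 0 := rfl

theorem pv_cond_iff (c k : Int) (hc : 0 ≤ c) (hk : k ≠ 0) :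
    (PySem.Int.floordiv c k > 0) ↔ (0 < k ∧ k ≤ c) := by
  by_cases hpos : 0 < k
  · have h := PySem.Int.le_floordiv_iff_mul_le (a := c) (b := k) (q := 1) hpos
    constructor
    · intro hq; exact ⟨hpos, by omega⟩
    · intro hq; omega
  · have hneg : k < 0 := by omega
    have h2 := PySem.Int.floordiv_mul_add_mod c k
    have h3 := PySem.Int.mod_neg_bounds (a := c) hneg
    constructor
    · intro hq
      exfalso
      have hb : (PySem.Int.floordiv c k - 1) * k ≤ 0 :=
        mul_nonpos_of_nonneg_of_nonpos (by omega) (by omega)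
      have e : (PySem.Int.floordiv c k - 1) * k = PySem.Int.floordiv c k * k - k := by ring
      omega
    · intro hq; omega

theorem pv_getD_setdefault_zero (d : PySem.Dict String Int) (u x : String) :
    (d.setdefault u 0).getD x 0 = d.getD x 0 := by
  by_cases hx : x = u
  · subst hx; exact PySem.Dict.getD_setdefault_self d x 0 0
  · rw [pv_getD_eq, pv_getD_eq, PySem.Dict.get?_setdefault_of_ne d 0 hx]

-- A's not-in/increment loop over the distinct reports builds the same dict as B's counter loop over the pairs.
theorem counting_dicts_eq (S : List String) :
    (S.foldl (fun (d : PySem.Dict String Int) r =>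
      let ut := pvSplit2 r
      if ¬ d.contains ut.2 then d.insert ut.2 1
      else d.insert ut.2 (d.getD ut.2 0 + 1)) PySem.Dict.empty)
    = ((S.map pvSplit2).foldl (fun d (p : String × String) => d.insert p.2 (d.getD p.2 0 + 1)) PySem.Dict.empty) := by
  rw [List.foldl_map]
  have hfun : (fun (d : PySem.Dict String Int) r =>
      let ut := pvSplit2 r
      if ¬ d.contains ut.2 then d.insert ut.2 1
      else d.insert ut.2 (d.getD ut.2 0 + 1))
      = fun d r => d.insert (pvSplit2 r).2 (d.getD (pvSplit2 r).2 0 + 1) := by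
    funext d r
    by_cases h : d.contains (pvSplit2 r).2
    · simp [h]
    · simp only [Bool.not_eq_true] at h
      simp [h, PySem.Dict.getD_of_not_contains d 0 h]
  exact congrFun (congrFun (congrArg List.foldl hfun) PySem.Dict.empty) S

-- One step of A's reporter loop adds 1 at key `id` exactly when this report is by `id` against an often-enough-reported target.
theorem reporter_step (reported : PySem.Dict String Int) (k : Int) (id r : String)
    (d : PySem.Dict String Int) :
    ((fun d r =>
      let ut := pvSplit2 r
      let count := (reported.get? ut.2).getD 0
      let d' := PySem.Dict.setdefault d ut.1 0
      if PySem.Int.floordiv count k > 0 then d'.insert ut.1 (d'.getD ut.1 0 + 1) else d') d r).getD id 0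
    = d.getD id 0 + (if (pvSplit2 r).1 = id ∧ PySem.Int.floordiv ((reported.get? (pvSplit2 r).2).getD 0) k > 0 then 1 else 0) := by
  show (if PySem.Int.floordiv ((reported.get? (pvSplit2 r).2).getD 0) k > 0
        then (PySem.Dict.setdefault d (pvSplit2 r).1 0).insert (pvSplit2 r).1
               ((PySem.Dict.setdefault d (pvSplit2 r).1 0).getD (pvSplit2 r).1 0 + 1)
        else PySem.Dict.setdefault d (pvSplit2 r).1 0).getD id 0 = _
  by_cases hc : PySem.Int.floordiv ((reported.get? (pvSplit2 r).2).getD 0) k > 0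
  · by_cases hu : (pvSplit2 r).1 = id
    · subst hu
      rw [if_pos hc, if_pos ⟨rfl, hc⟩, PySem.Dict.getD_insert_self, pv_getD_setdefault_zero]
    · rw [if_pos hc, if_neg (fun h => hu h.1),
          PySem.Dict.getD_insert_of_ne _ _ _ (fun h => hu h.symm), pv_getD_setdefault_zero]
      omega
  · rw [if_neg hc, if_neg (fun h => hc h.2), pv_getD_setdefault_zero]
    omega

-- A's reporter dict, read at `id`, is a count over the distinct reports.
theorem reporter_read (l : List String) (reported : PySem.Dict String Int) (k : Int) (id : String)
    (d : PySem.Dict String Int) :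
    ((l.foldl (fun d r =>
      let ut := pvSplit2 r
      let count := (reported.get? ut.2).getD 0
      let d' := PySem.Dict.setdefault d ut.1 0
      if PySem.Int.floordiv count k > 0 then d'.insert ut.1 (d'.getD ut.1 0 + 1) else d') d).getD id 0)
    = d.getD id 0 + (l.countP (fun r => decide ((pvSplit2 r).1 = id ∧ PySem.Int.floordiv ((reported.get? (pvSplit2 r).2).getD 0) k > 0)) : Int) := by
  induction l generalizing d with
  | nil => simp
  | cons r l ih =>
    rw [List.foldl_cons, ih, List.countP_cons, reporter_step reported k id r d]
    simp only [decide_eq_true_eq]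
    split_ifs with h <;> (push_cast; omega)

-- Python's `d.get(id) if d.get(id) else 0` reads getD id 0 (values None and 0 both give 0).
theorem pv_truthy_read (d : PySem.Dict String Int) (id : String) :
    (match d.get? id with
     | some v => if v ≠ 0 then v else 0
     | none => 0) = d.getD id 0 := by
  rw [pv_getD_eq]
  cases d.get? id with
  | none => rfl
  | some v => by_cases hv : v = 0 <;> simp [hv]

-- ===== VERDICT (by name: the statement is the Claim_ definition above) =====
theorem solution_spec : Claim_equal_solution := by
  intro id_list report k _ hpre
  obtain ⟨hk, hsplit⟩ := hpre
  unfold Spec_solution solution solution_alt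
  have hdicts := counting_dicts_eq (PySem.Set.ofList report)
  have hnn : ∀ t : String,
      0 ≤ (List.foldl (fun (d : PySem.Dict String Int) (p : String × String) =>
              d.insert p.2 (d.getD p.2 0 + 1)) PySem.Dict.empty
              ((PySem.Set.ofList report).map pvSplit2)).getD t 0 := by
    intro t
    rw [← List.foldl_map (f := fun p : String × String => p.2)
          (g := fun (d : PySem.Dict String Int) x => d.insert x (d.getD x 0 + 1)),
        PySem.Dict.getD_foldl_insert_add_one, PySem.Dict.getD_empty]
    positivity
  simp only []
  refine List.map_congr_left (fun id _ => ?_)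
  rw [pv_truthy_read, reporter_read, PySem.Dict.getD_empty, List.foldl_map,
      PySem.List.foldl_ite_add_one]
  refine congrArg (fun n : Nat => (0:Int) + (n:Int)) (List.countP_congr (fun r hr => ?_))
  have hknz : k ≠ 0 := by
    rcases hk with h | h
    · exact h
    · subst h; simp at hr
  simp only [decide_eq_true_eq]
  rw [← pv_getD_eq, hdicts, pv_cond_iff _ _ (hnn _) hknz]
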